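-- pv_equiv track=rewrite | github.com/fruchti/ag3 | walfang/walfang.py | walposition
-- ===== SOURCE A (Python) =====
-- def walposition(mat):
--     pos = None
--     for y in range(len(mat)):
--         for x in range(len(mat[y])):
--             if mat[y][x] != 0:
--                 if pos == None:
--                     pos = [x, y]
--                 else:
--                     return None
--     return pos
-- ===== SOURCE B (Python) =====
-- def walposition(mat):
--     # Arithmetic reduction: count the non-zero cells and accumulate the sums of
--     # their x- and y-coordinates; with exactly one non-zero cell those sums ARE
--     # its coordinates, otherwise the answer is None.  No position is ever stored.
--     count = 0
--     sx = 0
--     sy = 0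
--     for y, row in enumerate(mat):
--         for x, v in enumerate(row):
--             if v != 0:
--                 count += 1
--                 sx += x
--                 sy += y
--     if count == 1:
--         return [sx, sy]
--     return None
-- ===== Notes on version B (the rewrite author's own statement) =====
-- stated objective: alternative
-- what changed: B never stores a position: it reduces the matrix to three integer accumulators (non-zero count and the sums of the x- and y-coordinates of non-zero cells) and reconstructs the answer arithmetically - the coordinate sums equal the unique position exactly when the count is 1 - instead of A's early-return duplicate detection with a stored candidate position.
import Mathlib
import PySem

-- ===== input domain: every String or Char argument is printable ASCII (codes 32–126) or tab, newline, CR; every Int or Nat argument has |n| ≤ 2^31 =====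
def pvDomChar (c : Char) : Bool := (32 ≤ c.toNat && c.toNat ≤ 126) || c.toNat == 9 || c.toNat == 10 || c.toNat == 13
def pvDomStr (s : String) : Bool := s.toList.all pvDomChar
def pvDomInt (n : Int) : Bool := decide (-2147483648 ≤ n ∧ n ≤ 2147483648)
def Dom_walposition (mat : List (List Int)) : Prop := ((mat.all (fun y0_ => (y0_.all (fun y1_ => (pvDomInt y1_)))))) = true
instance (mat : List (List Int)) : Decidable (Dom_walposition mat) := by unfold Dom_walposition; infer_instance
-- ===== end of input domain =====

-- B reduces the matrix to three accumulators (non-zero count, sum of x's, sum of y's) and reconstructs the position arithmetically instead of storing it with early-return duplicate detection; same cost, different algorithm.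


-- ===== PORT A =====
-- Inner loop over one row; `some st` = continue with pos = st, `none` = early `return None`.
def walpositionRow : List Int → Int → Int → Option (List Int) → Option (Option (List Int))
  | [], _, _, pos => some pos
  | v :: rest, x, y, pos =>
    if v ≠ 0 then
      match pos with
      | none => walpositionRow rest (x + 1) y (some [x, y])
      | some _ => none
    else walpositionRow rest (x + 1) y pos

-- Outer loop over the rows.
def walpositionRows : List (List Int) → Int → Option (List Int) → Option (List Int)
  | [], _, pos => pos
  | row :: rest, y, pos =>
    match walpositionRow row 0 y pos with
    | none => none
    | some pos' => walpositionRows rest (y + 1) pos'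

def walposition (mat : List (List Int)) : Option (List Int) :=
  walpositionRows mat 0 none

-- ===== PORT B =====
-- Inner loop: thread the three accumulators (count, sx, sy) through one row.
def altRow : List Int → Int → Int → (Int × Int × Int) → (Int × Int × Int)
  | [], _, _, st => st
  | v :: rest, x, y, (c, sx, sy) =>
    altRow rest (x + 1) y (if v ≠ 0 then (c + 1, sx + x, sy + y) else (c, sx, sy))

-- Outer loop over the rows.
def altRows : List (List Int) → Int → (Int × Int × Int) → (Int × Int × Int)
  | [], _, st => st
  | row :: rest, y, st => altRows rest (y + 1) (altRow row 0 y st)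

def walposition_alt (mat : List (List Int)) : Option (List Int) :=
  match altRows mat 0 (0, 0, 0) with
  | (c, sx, sy) => if c = 1 then some [sx, sy] else none

-- ===== PRECONDITION & SPEC =====
def Spec_walposition (mat : List (List Int)) (out : Option (List Int)) : Prop := out = walposition_alt mat
instance (mat : List (List Int)) (out : Option (List Int)) : Decidable (Spec_walposition mat out) := by unfold Spec_walposition; infer_instance

-- ===== CLAIM (what is proved, stated in full; the proofs are below) =====
def Claim_equal_walposition : Prop := ∀ (mat : List (List Int)), Dom_walposition mat → Spec_walposition mat (walposition mat)

-- ===== LEMMAS AND PROOFS =====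

-- Proof-only abstraction: the list of non-zero positions, in scan order.
def collectRow : List Int → Int → Int → List (List Int)
  | [], _, _ => []
  | v :: rest, x, y => (if v ≠ 0 then [[x, y]] else []) ++ collectRow rest (x + 1) y

def collectRows : List (List Int) → Int → List (List Int)
  | [], _ => []
  | row :: rest, y => collectRow row 0 y ++ collectRows rest (y + 1)

-- The positions already seen, as a list (the loop state `pos` of A).
def posList : Option (List Int) → List (List Int)
  | none => []
  | some p => [p]

-- What A's inner loop computes, as a function of the collected list.
def stepOf : List (List Int) → Option (Option (List Int))
  | [] => some none
  | [q] => some (some q)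
  | _ => none

-- What A's outer loop computes, as a function of the collected list.
def resOf : List (List Int) → Option (List Int)
  | [q] => some q
  | _ => none

theorem walpositionRow_eq (row : List Int) :
    ∀ (x y : Int) (pos : Option (List Int)),
      walpositionRow row x y pos = stepOf (posList pos ++ collectRow row x y) := by
  induction row with
  | nil =>
    intro x y pos
    cases pos <;> simp [walpositionRow, collectRow, posList, stepOf]
  | cons v rest ih =>
    intro x y pos
    by_cases hv : v = 0
    · simp [walpositionRow, collectRow, hv, ih]
    · cases pos with
      | none =>
        simp [walpositionRow, collectRow, hv, ih, posList]
      | some p =>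
        rw [show walpositionRow (v :: rest) x y (some p) = none by
              simp [walpositionRow, hv]]
        cases h : collectRow rest (x + 1) y <;>
          simp [collectRow, hv, posList, stepOf, h]

theorem walpositionRows_eq (rows : List (List Int)) :
    ∀ (y : Int) (pos : Option (List Int)),
      walpositionRows rows y pos = resOf (posList pos ++ collectRows rows y) := by
  induction rows with
  | nil =>
    intro y pos
    cases pos <;> simp [walpositionRows, collectRows, posList, resOf]
  | cons row rest ih =>
    intro y pos
    rw [walpositionRows, walpositionRow_eq, collectRows, ← List.append_assoc]
    rcases hL : posList pos ++ collectRow row 0 y with _ | ⟨a, _ | ⟨b, l⟩⟩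
    · simpa [stepOf, posList] using ih (y + 1) none
    · simpa [stepOf, posList] using ih (y + 1) (some a)
    · rfl

-- B-side abstraction: componentwise addition of accumulator triples, and the
-- summary (count, Σx, Σy) of a collected position list.
def addT : (Int × Int × Int) → (Int × Int × Int) → (Int × Int × Int)
  | (a, b, c), (d, e, f) => (a + d, b + e, c + f)

def elemT : List Int → (Int × Int × Int)
  | [a, b] => (1, a, b)
  | _ => (1, 0, 0)

def sumOf : List (List Int) → (Int × Int × Int)
  | [] => (0, 0, 0)
  | p :: r => addT (elemT p) (sumOf r)

theorem addT_assoc (a b c : Int × Int × Int) : addT (addT a b) c = addT a (addT b c) := by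
  rcases a with ⟨a1, a2, a3⟩; rcases b with ⟨b1, b2, b3⟩; rcases c with ⟨c1, c2, c3⟩
  simp [addT]; omega

theorem addT_zero (a : Int × Int × Int) : addT (0, 0, 0) a = a := by
  rcases a with ⟨a1, a2, a3⟩; simp [addT]

theorem altRow_eq (row : List Int) :
    ∀ (x y : Int) (st : Int × Int × Int),
      altRow row x y st = addT st (sumOf (collectRow row x y)) := by
  induction row with
  | nil =>
    intro x y st
    rcases st with ⟨c, sx, sy⟩
    simp [altRow, collectRow, sumOf, addT]
  | cons v rest ih =>
    intro x y st
    rcases st with ⟨c, sx, sy⟩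
    by_cases hv : v = 0
    · simp [altRow, collectRow, hv, ih]
    · simp only [altRow, collectRow, hv, ne_eq, not_false_iff, if_pos,
        List.singleton_append, sumOf, ih]
      rw [← addT_assoc]
      simp [addT, elemT]

theorem sumOf_append (L1 L2 : List (List Int)) :
    sumOf (L1 ++ L2) = addT (sumOf L1) (sumOf L2) := by
  induction L1 with
  | nil => simp [sumOf, addT_zero]
  | cons p r ih => simp [sumOf, ih, addT_assoc]

theorem altRows_eq (rows : List (List Int)) :
    ∀ (y : Int) (st : Int × Int × Int),
      altRows rows y st = addT st (sumOf (collectRows rows y)) := by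
  induction rows with
  | nil =>
    intro y st
    rcases st with ⟨c, sx, sy⟩
    simp [altRows, collectRows, sumOf, addT]
  | cons row rest ih =>
    intro y st
    rw [altRows, altRow_eq, ih, collectRows, sumOf_append, addT_assoc]

-- Every collected position has the literal shape [x, y].
theorem collectRow_shape (row : List Int) :
    ∀ (x y : Int) (p : List Int), p ∈ collectRow row x y → ∃ a b : Int, p = [a, b] := by
  induction row with
  | nil => intro x y p h; simp [collectRow] at h
  | cons v rest ih =>
    intro x y p h
    simp only [collectRow, List.mem_append] at h
    rcases h with h | h
    · by_cases hv : v = 0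
      · simp [hv] at h
      · simp [hv] at h; exact ⟨x, y, h⟩
    · exact ih (x + 1) y p h

theorem collectRows_shape (rows : List (List Int)) :
    ∀ (y : Int) (p : List Int), p ∈ collectRows rows y → ∃ a b : Int, p = [a, b] := by
  induction rows with
  | nil => intro y p h; simp [collectRows] at h
  | cons row rest ih =>
    intro y p h
    simp only [collectRows, List.mem_append] at h
    rcases h with h | h
    · exact collectRow_shape row 0 y p h
    · exact ih (y + 1) p h

-- The count component is the length of the collected list.
theorem sumOf_fst (L : List (List Int)) : (sumOf L).1 = (L.length : Int) := by
  induction L with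
  | nil => simp [sumOf]
  | cons p r ih =>
    rcases hp : elemT p with ⟨e1, e2, e3⟩
    have he1 : e1 = 1 := by
      rcases p with _ | ⟨a, _ | ⟨b, _ | _⟩⟩ <;> simp [elemT] at hp <;> omega
    rcases hs : sumOf r with ⟨c, sx, sy⟩
    simp [sumOf, hp, hs, addT, he1]
    have := ih; rw [hs] at this; simp at this; omega

-- ===== VERDICT (by name: the statement is the Claim_ definition above) =====
theorem walposition_spec : Claim_equal_walposition := by
  intro mat _
  unfold Spec_walposition walposition walposition_alt
  rw [walpositionRows_eq, altRows_eq, addT_zero]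
  simp only [posList, List.nil_append]
  cases hL : collectRows mat 0 with
  | nil => simp [resOf, sumOf]
  | cons p l =>
    cases l with
    | cons q l' =>
      have hc := sumOf_fst (p :: q :: l')
      rcases hs : sumOf (p :: q :: l') with ⟨c, sx, sy⟩
      rw [hs] at hc; simp at hc
      have : c ≠ 1 := by omega
      simp [resOf, this]
    | nil =>
      obtain ⟨a, b, rfl⟩ := collectRows_shape mat 0 p (by rw [hL]; simp)
      simp [resOf, sumOf, elemT, addT]
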